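-- pv_equiv track=rewrite | github.com/MariaGarciaCS/CS458-practice | simple_substitution.py | doubles
-- ===== SOURCE A (Python) =====
-- def doubles(s):
--     doubles = []
--     cur = " "
--     for word in s:
--         for c in word:
--             if c == cur:
--                 doubles.append(c)
--             else:
--                 cur = c
--     return doubles
-- ===== SOURCE B (Python) =====
-- def doubles(s):
--     # Run-based two-pointer scan: flatten to one stream with a leading space;
--     # for each run of equal consecutive characters emit all but its first element.
--     stream = " " + "".join(s)
--     n = len(stream)
--     out = []
--     i = 0
--     while i < n:
--         j = i + 1
--         while j < n and stream[j] == stream[i]: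
--             j += 1
--         out.extend(stream[i + 1:j])
--         i = j
--     return out
-- ===== Notes on version B (the rewrite author's own statement) =====
-- stated objective: alternative
-- what changed: Replaces the stateful per-character predecessor tracking over nested word/char loops by flattening everything into one stream with a leading space and scanning it with two index pointers run by run, emitting each run minus its first element.
import Mathlib
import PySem

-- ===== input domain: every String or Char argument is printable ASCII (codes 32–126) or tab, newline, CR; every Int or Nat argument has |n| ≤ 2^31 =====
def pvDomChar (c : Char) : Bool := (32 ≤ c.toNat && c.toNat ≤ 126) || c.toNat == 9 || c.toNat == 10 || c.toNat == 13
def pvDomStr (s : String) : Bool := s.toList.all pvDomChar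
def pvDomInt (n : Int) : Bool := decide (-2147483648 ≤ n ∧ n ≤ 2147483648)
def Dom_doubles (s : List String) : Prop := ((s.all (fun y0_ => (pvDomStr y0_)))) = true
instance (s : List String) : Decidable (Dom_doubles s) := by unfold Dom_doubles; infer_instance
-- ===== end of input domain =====

-- B replaces A's stateful predecessor tracking over nested word/char loops by a run-by-run
-- two-pointer scan of one flattened stream (alternative decomposition, same asymptotic cost).

-- ===== PORT A =====
-- state: (doubles list so far, cur); one step of the inner 'for c in word' loop
def doublesStep (st : List String × Char) (c : Char) : List String × Char :=
  if c == st.2 then (st.1 ++ [String.ofList [c]], st.2) else (st.1, c)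

def doubles (s : List String) : List String :=
  (s.foldl (fun st w => w.toList.foldl doublesStep st) ([], ' ')).1

-- ===== PORT B =====
-- inner 'while j < n and stream[j] == stream[i]' loop of Source B (c is stream[i])
def runEnd (cs : List Char) (c : Char) (j : Nat) : Nat :=
  if h : j < cs.length then
    if cs[j] == c then runEnd cs c (j + 1) else j
  else j
termination_by cs.length - j

-- j ≥ i+1 > i, so the outer loop advances (used by scanFrom's termination proof)
lemma runEnd_ge (cs : List Char) (c : Char) (j : Nat) : j ≤ runEnd cs c j := by
  induction j using runEnd.induct cs c with
  | case1 j h hb ih => rw [runEnd]; simp only [h, dif_pos, hb, if_pos]; omega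
  | case2 j h hb => rw [runEnd]; simp [h, hb]
  | case3 j h => rw [runEnd]; simp [h]

-- outer 'while i < n' loop of Source B; stream[i+1:j] with 0 ≤ i+1 and j ≤ n is drop/take
def scanFrom (cs : List Char) (i : Nat) : List String :=
  if h : i < cs.length then
    let j := runEnd cs cs[i] (i + 1)
    ((cs.drop (i + 1)).take (j - (i + 1))).map (fun d => String.ofList [d]) ++ scanFrom cs j
  else []
termination_by cs.length - i
decreasing_by
  have := runEnd_ge cs cs[i] (i + 1)
  omega

def doubles_alt (s : List String) : List String :=
  scanFrom (' ' :: (s.map String.toList).flatten) 0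

-- ===== PRECONDITION & SPEC =====
def Spec_doubles (s : List String) (out : List String) : Prop := out = doubles_alt s
instance (s : List String) (out : List String) : Decidable (Spec_doubles s out) := by unfold Spec_doubles; infer_instance

-- ===== CLAIM (what is proved, stated in full; the proofs are below) =====
def Claim_equal_doubles : Prop := ∀ (s : List String), Dom_doubles s → Spec_doubles s (doubles s)

-- ===== LEMMAS AND PROOFS =====

-- proof-side bridge: the run-tails of a character stream, recursion on the list itself
def doublesRuns : List Char → List String
  | [] => []
  | c :: rest =>
    (rest.takeWhile (· == c)).map (fun d => String.ofList [d]) ++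
      doublesRuns (rest.dropWhile (· == c))
termination_by l => l.length
decreasing_by
  simp only [List.length_cons]
  exact Nat.lt_succ_of_le (List.length_dropWhile_le _ _)

lemma take_length_takeWhile (l : List Char) (p : Char → Bool) :
    l.take (l.takeWhile p).length = l.takeWhile p :=
  (List.prefix_iff_eq_take.mp (List.takeWhile_prefix p)).symm

lemma drop_length_takeWhile (l : List Char) (p : Char → Bool) :
    l.drop (l.takeWhile p).length = l.dropWhile p := by
  induction l with
  | nil => simp
  | cons c cs ih =>
    by_cases h : p c
    · simp [List.takeWhile, List.dropWhile, h, ih]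
    · simp [List.takeWhile, List.dropWhile, h]

-- the inner while loop stops exactly after the run of characters equal to c
lemma runEnd_eq (cs : List Char) (c : Char) (j : Nat) :
    runEnd cs c j = j + ((cs.drop j).takeWhile (· == c)).length := by
  induction j using runEnd.induct cs c with
  | case1 j h hb ih =>
    rw [runEnd]
    simp only [h, dif_pos, hb, if_pos, ih]
    rw [List.drop_eq_getElem_cons h, List.takeWhile_cons]
    simp only [hb, if_true, List.length_cons]
    omega
  | case2 j h hb =>
    rw [runEnd]
    rw [List.drop_eq_getElem_cons h]
    simp [h, hb]
  | case3 j h =>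
    rw [runEnd]
    simp [h, List.drop_eq_nil_of_le (Nat.le_of_not_lt h)]

-- the index-based outer loop computes the run-tails of the remaining stream
lemma scanFrom_eq (cs : List Char) (i : Nat) : scanFrom cs i = doublesRuns (cs.drop i) := by
  induction i using scanFrom.induct cs with
  | case1 i h j ih =>
    rw [scanFrom]
    simp only [h, dif_pos]
    rw [List.drop_eq_getElem_cons h, doublesRuns]
    have hj : j = (i + 1) + ((cs.drop (i + 1)).takeWhile (· == cs[i])).length :=
      runEnd_eq cs cs[i] (i + 1)
    have h1 : j - (i + 1) = ((cs.drop (i + 1)).takeWhile (· == cs[i])).length := by omega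
    have h2 : cs.drop j = (cs.drop (i + 1)).dropWhile (· == cs[i]) := by
      rw [← drop_length_takeWhile (cs.drop (i + 1)) (fun x => x == cs[i]), List.drop_drop]
      congr 1
    rw [ih, h1, take_length_takeWhile, h2]
  | case2 i h =>
    rw [scanFrom]
    simp [h, List.drop_eq_nil_of_le (Nat.le_of_not_lt h), doublesRuns]

-- the char-level fold with current character `prev` produces exactly the run-tails of `prev :: l`
lemma foldl_doublesStep_eq (l : List Char) : ∀ (acc : List String) (prev : Char),
    (l.foldl doublesStep (acc, prev)).1 = acc ++ doublesRuns (prev :: l) := by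
  induction l with
  | nil => intro acc prev; simp [doublesRuns]
  | cons c cs ih =>
    intro acc prev
    by_cases h : c = prev
    · subst h
      simp only [List.foldl_cons, doublesStep, beq_self_eq_true, if_true]
      rw [ih]
      simp [doublesRuns, List.takeWhile, List.dropWhile]
    · have hb : (c == prev) = false := beq_eq_false_iff_ne.mpr h
      simp only [List.foldl_cons, doublesStep, hb]
      rw [ih]
      simp [doublesRuns, List.takeWhile, List.dropWhile, hb]

-- folding word by word is folding over the flattened character stream
lemma foldl_words_eq (ws : List String) : ∀ (st : List String × Char),
    ws.foldl (fun st w => w.toList.foldl doublesStep st) st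
      = ((ws.map String.toList).flatten).foldl doublesStep st := by
  induction ws with
  | nil => intro st; simp
  | cons w ws ih => intro st; simp [List.foldl_append, ih]

-- ===== VERDICT (by name: the statement is the Claim_ definition above) =====
theorem doubles_spec : Claim_equal_doubles := by
  intro s _
  unfold Spec_doubles doubles doubles_alt
  rw [foldl_words_eq, foldl_doublesStep_eq, scanFrom_eq]
  simp
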